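-- pv_equiv track=rewrite | github.com/jjacisin/Mod_1_project | dash_package/dash_queries.py | setList1Count
-- ===== SOURCE A (Python) =====
-- def setList1Count(inputList):
--     newDatDict = dict()
--     cleanedList = [i for i in inputList if i]
--     listKeys = sorted(list(set(cleanedList)))
--
--     #'Initialize '
--     for a in listKeys:
--         newDatDict[a] = 0
--         #'Fill'
--         for b in inputList:
--             if a == b:
--                 newDatDict[a] += 1
--
--     return newDatDict
-- ===== SOURCE B (Python) =====
-- def setList1Count(inputList):
--     # Sort the truthy elements once, then count runs of equal elements in a
--     # single grouped pass; keys come out in sorted order, exactly like A's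
--     # sorted(set(...)) with a per-key rescan.
--     sortedList = sorted(i for i in inputList if i)
--     result = {}
--     if not sortedList:
--         return result
--     key = sortedList[0]
--     count = 1
--     for x in sortedList[1:]:
--         if x == key:
--             count += 1
--         else:
--             result[key] = count
--             key = x
--             count = 1
--     result[key] = count
--     return result
-- ===== Notes on version B (the rewrite author's own statement) =====
-- stated objective: faster
-- what changed: Instead of rescanning the whole input list once per distinct key, B sorts the truthy elements once and emits (key, run length) pairs in a single grouped pass over the sorted list.
import Mathlib
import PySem

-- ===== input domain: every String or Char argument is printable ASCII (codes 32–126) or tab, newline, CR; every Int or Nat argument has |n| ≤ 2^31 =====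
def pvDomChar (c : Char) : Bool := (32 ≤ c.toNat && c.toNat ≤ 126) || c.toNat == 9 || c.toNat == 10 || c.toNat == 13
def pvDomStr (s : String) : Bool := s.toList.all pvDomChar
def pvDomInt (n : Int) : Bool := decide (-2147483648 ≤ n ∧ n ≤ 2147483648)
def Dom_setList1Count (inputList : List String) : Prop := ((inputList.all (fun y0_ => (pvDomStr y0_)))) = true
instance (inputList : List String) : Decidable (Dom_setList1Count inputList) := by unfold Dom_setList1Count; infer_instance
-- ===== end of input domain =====

-- B sorts the truthy elements once and counts runs in one grouped pass instead of
-- rescanning the whole input list once per distinct key.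

-- ===== PORT A =====
def setList1Count (inputList : List String) : List (String × Int) :=
  let cleanedList := inputList.filter (fun i => !(i == ""))
  let listKeys := PySem.List.sorted (PySem.Set.ofList cleanedList) (fun a => a)
  let d := listKeys.foldl (fun d a =>
      inputList.foldl (fun d b => if a == b then d.modify a 0 (· + 1) else d)
        (d.insert a 0))
    (PySem.Dict.empty : PySem.Dict String Int)
  d.items

-- ===== PORT B =====
-- the run-counting loop of Source B: current key and its running count
def altRuns : List String → String → Int → List (String × Int)
  | [], key, count => [(key, count)]
  | x :: xs, key, count =>
      if x == key then altRuns xs key (count + 1)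
      else (key, count) :: altRuns xs x 1

def setList1Count_alt (inputList : List String) : List (String × Int) :=
  let sortedList := PySem.List.sorted (inputList.filter (fun i => !(i == ""))) (fun a => a)
  match sortedList with
  | [] => []
  | x :: xs => altRuns xs x 1

-- ===== PRECONDITION & SPEC =====
def Spec_setList1Count (inputList : List String) (out : List (String × Int)) : Prop := out = setList1Count_alt inputList
instance (inputList : List String) (out : List (String × Int)) : Decidable (Spec_setList1Count inputList out) := by unfold Spec_setList1Count; infer_instance

-- ===== CLAIM (what is proved, stated in full; the proofs are below) =====
def Claim_equal_setList1Count : Prop := ∀ (inputList : List String), Dom_setList1Count inputList → Spec_setList1Count inputList (setList1Count inputList)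

-- ===== LEMMAS AND PROOFS =====

-- A's inner loop over inputList: starting from d with key a just set to c, it ends with a ↦ c + count
lemma inner_loop (l : List String) (a : String) (d : PySem.Dict String Int) (c : Int) :
    l.foldl (fun d b => if a == b then d.modify a 0 (· + 1) else d) (d.insert a c)
      = d.insert a (c + (l.count a : Int)) := by
  induction l generalizing c with
  | nil => simp
  | cons b l ih =>
    by_cases hb : a = b
    · subst hb
      have hm : (d.insert a c).modify a 0 (· + 1) = d.insert a (c + 1) := by
        simp [PySem.Dict.modify, PySem.Dict.getD_insert_self, PySem.Dict.insert_insert_self]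
      simp only [List.foldl, beq_self_eq_true, if_pos, hm, ih, List.count_cons]
      congr 1
      push_cast
      ring
    · have hb' : (a == b) = false := by simp [hb]
      have hb'' : (b == a) = false := by simp [Ne.symm hb]
      rw [List.foldl_cons, if_neg (by simp [hb'])]
      rw [ih, List.count_cons, hb'']
      simp

lemma discard_of_not_mem (k : String) (l : List String) (h : k ∉ l) :
    PySem.Set.discard l k = l := by
  simp only [PySem.Set.discard]
  apply List.filter_eq_self.mpr
  intro x hx
  simp only [Bool.not_eq_eq_eq_not, Bool.not_true, beq_eq_false_iff_ne, ne_eq]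
  exact fun he => h (he ▸ hx)

lemma discard_cons_self (x : String) (s : List String) :
    PySem.Set.discard (x :: s) x = PySem.Set.discard s x := by
  simp [PySem.Set.discard]

lemma discard_discard_self (x : String) (s : List String) :
    PySem.Set.discard (PySem.Set.discard s x) x = PySem.Set.discard s x := by
  simp [PySem.Set.discard, List.filter_filter]

lemma mem_discard_ne {a x : String} {s : List String}
    (h : a ∈ PySem.Set.discard s x) : a ∈ s ∧ a ≠ x := by
  simpa [PySem.Set.discard, List.mem_filter] using h

-- Set.ofList is a sublist of its input (first occurrences, in order)
lemma ofList_sublist (xs : List String) : List.Sublist (PySem.Set.ofList xs) xs := by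
  induction xs with
  | nil => simp [PySem.Set.ofList_nil]
  | cons x xs ih =>
    rw [PySem.Set.ofList_cons]
    refine List.Sublist.cons₂ x (List.Sublist.trans ?_ ih)
    simp only [PySem.Set.discard]
    exact List.filter_sublist

-- B's run loop on a sorted tail yields each distinct key once, with its count
lemma altRuns_spec (xs : List String) (k : String) (c : Int)
    (h : (k :: xs).Pairwise (· ≤ ·)) :
    altRuns xs k c
      = (k, c + (xs.count k : Int)) ::
        (PySem.Set.discard (PySem.Set.ofList xs) k).map (fun a => (a, (xs.count a : Int))) := by
  induction xs generalizing k c with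
  | nil => simp [altRuns, PySem.Set.ofList_nil, PySem.Set.discard]
  | cons x xs ih =>
    rw [List.pairwise_cons] at h
    obtain ⟨hk, hx⟩ := h
    by_cases hxk : x = k
    · subst hxk
      rw [show altRuns (x :: xs) x c = altRuns xs x (c + 1) by simp [altRuns]]
      rw [ih x (c + 1) hx]
      rw [PySem.Set.ofList_cons, discard_cons_self, discard_discard_self]
      congr 1
      · simp only [List.count_cons_self, Prod.mk.injEq, true_and]; push_cast; ring
      · apply List.map_congr_left
        intro a ha
        have := mem_discard_ne ha
        rw [List.count_cons_of_ne (Ne.symm this.2)]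
    · have hxkb : (x == k) = false := by simp [hxk]
      have hkx : k < x := lt_of_le_of_ne (hk x (List.mem_cons_self)) (Ne.symm hxk)
      have hknot : k ∉ x :: xs := by
        intro hmem
        rcases List.mem_cons.mp hmem with he | hmem'
        · exact hxk he.symm
        · have hxa : x ≤ k := (List.pairwise_cons.mp hx).1 k hmem'
          exact absurd (lt_of_lt_of_le hkx hxa) (lt_irrefl k)
      rw [show altRuns (x :: xs) k c = (k, c) :: altRuns xs x 1 by simp [altRuns, hxkb]]
      rw [ih x 1 hx]
      rw [discard_of_not_mem k _ (fun hm => hknot ((PySem.Set.mem_ofList _ _).mp hm))]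
      rw [PySem.Set.ofList_cons]
      rw [List.count_eq_zero.mpr hknot]
      simp only [List.map_cons]
      congr 1
      · norm_num
      congr 1
      · simp only [List.count_cons_self, Prod.mk.injEq, true_and]; push_cast; ring
      · apply List.map_congr_left
        intro a ha
        have := mem_discard_ne ha
        rw [List.count_cons_of_ne (Ne.symm this.2)]

-- sorting then deduplicating = deduplicating then sorting
lemma sorted_ofList_comm (l : List String) :
    PySem.List.sorted (PySem.Set.ofList l) (fun a => a)
      = PySem.Set.ofList (PySem.List.sorted l (fun a => a)) := by
  apply PySem.List.sorted_eq_of_perm_of_pairwise_lt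
  · apply (List.perm_ext_iff_of_nodup (PySem.Set.nodup_ofList _) (PySem.Set.nodup_ofList _)).mpr
    intro a
    rw [PySem.Set.mem_ofList, PySem.Set.mem_ofList,
      (PySem.List.sorted_perm l (fun a => a) false).mem_iff]
  · have hle : List.Pairwise (fun a b : String => a ≤ b)
        (PySem.Set.ofList (PySem.List.sorted l (fun a => a))) :=
      (PySem.List.sorted_pairwise l (fun a => a)).sublist (ofList_sublist _)
    have hne := PySem.Set.nodup_ofList (PySem.List.sorted l (fun a => a))
    exact (hle.and hne).imp (fun h => lt_of_le_of_ne h.1 h.2)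

-- A's items are the sorted distinct truthy keys paired with their counts over inputList
lemma a_items (inputList : List String) :
    setList1Count inputList
      = (PySem.Set.ofList (PySem.List.sorted (inputList.filter (fun i => !(i == ""))) (fun a => a))).map
          (fun a => (a, (inputList.count a : Int))) := by
  unfold setList1Count
  dsimp only
  rw [show (fun (d : PySem.Dict String Int) (a : String) =>
        inputList.foldl (fun d b => if a == b then d.modify a 0 (· + 1) else d) (d.insert a 0))
      = fun d a => d.insert a ((inputList.count a : Int)) from by
    funext d a; rw [inner_loop]; norm_num]
  rw [sorted_ofList_comm]
  have := PySem.Dict.items_foldl_insert_fresh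
      (l := PySem.Set.ofList (PySem.List.sorted (inputList.filter (fun i => !(i == ""))) (fun a => a)))
      (k := fun a => a) (v := fun a => (inputList.count a : Int))
      (d := (PySem.Dict.empty : PySem.Dict String Int))
      (by intro a _; exact PySem.Dict.contains_empty _)
      (by simpa using PySem.Set.nodup_ofList _)
  simp [PySem.Dict.empty] at this
  exact this

-- a key appearing in the sorted cleaned list is truthy, so its count there equals its count in inputList
lemma count_transfer (inputList : List String) (a : String)
    (ha : a ∈ PySem.List.sorted (inputList.filter (fun i => !(i == ""))) (fun a => a)) :
    (PySem.List.sorted (inputList.filter (fun i => !(i == ""))) (fun a => a)).count a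
      = inputList.count a := by
  rw [(PySem.List.sorted_perm (inputList.filter (fun i => !(i == ""))) (fun a => a) false).count_eq]
  apply List.count_filter
  exact (List.mem_filter.mp
    ((PySem.List.sorted_perm (inputList.filter (fun i => !(i == ""))) (fun a => a) false).mem_iff.mp ha)).2

lemma a_eq_b (inputList : List String) : setList1Count inputList = setList1Count_alt inputList := by
  rw [a_items]
  unfold setList1Count_alt
  dsimp only
  have hp0 := PySem.List.sorted_pairwise (inputList.filter (fun i => !(i == ""))) (fun a : String => a)
  have hc := count_transfer inputList
  generalize hgen : PySem.List.sorted (inputList.filter (fun i => !(i == ""))) (fun a => a) = s at hp0 hc ⊢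
  cases s with
  | nil => simp [PySem.Set.ofList_nil]
  | cons x xs =>
    dsimp only
    rw [altRuns_spec xs x 1 hp0]
    rw [PySem.Set.ofList_cons, List.map_cons]
    congr 1
    · rw [← hc x List.mem_cons_self, List.count_cons_self]
      simp only [Prod.mk.injEq, true_and]
      push_cast; ring
    · apply List.map_congr_left
      intro a ha
      obtain ⟨hmem, hne⟩ := mem_discard_ne ha
      have hmem' : a ∈ x :: xs := List.mem_cons_of_mem _ ((PySem.Set.mem_ofList _ _).mp hmem)
      rw [← hc a hmem', List.count_cons_of_ne (Ne.symm hne)]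

-- ===== VERDICT (by name: the statement is the Claim_ definition above) =====
theorem setList1Count_spec : Claim_equal_setList1Count := by
  intro inputList _
  unfold Spec_setList1Count
  exact a_eq_b inputList
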